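-- pv_equiv track=rewrite | github.com/jeffreyhorn/nlp2mcp | src/ir/preprocessor.py | _has_statement_ending_semicolon
-- ===== SOURCE A (Python) =====
-- def _has_statement_ending_semicolon(line: str) -> bool:
--     """Check if a line has a semicolon that ends a statement (not in string).
--
--     This handles:
--     - Semicolons inside single or double quoted strings are ignored
--     - Escaped quotes within strings (e.g., "test\\"quote" or 'test\\'quote')
--
--     Note on comment/non-code handling in the surrounding preprocessor:
--     - `*` is treated as a line comment only when it appears in column 1; such
--       full-line comments are removed before this function is called.
--     - Anything after a statement-terminating `;` is treated as non-code and is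
--       ignored for scanning (including any `*` that might appear there).
--
--     This helper only detects a semicolon that is outside of string literals. It
--     assumes that full-line comments and trailing non-code after `;` have already
--     been stripped. It does not handle nested quotes, but works for typical GAMS
--     code.
--     """
--     in_string = None
--     i = 0
--     while i < len(line):
--         c = line[i]
--
--         # Handle string state
--         if in_string:
--             if c == in_string:
--                 # Check if the quote is escaped by counting preceding backslashes
--                 # An odd number of backslashes means the quote is escaped
--                 backslash_count = 0
--                 j = i - 1
--                 while j >= 0 and line[j] == "\\":
--                     backslash_count += 1
--                     j -= 1
--                 if backslash_count % 2 == 1: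
--                     # Quote is escaped, stay in string
--                     i += 1
--                     continue
--                 in_string = None
--             i += 1
--             continue
--
--         # Check for string start
--         if c in ('"', "'"):
--             in_string = c
--             i += 1
--             continue
--
--         # Check for semicolon outside string
--         if c == ";":
--             return True
--
--         i += 1
--
--     return False
-- ===== SOURCE B (Python) =====
-- def _has_statement_ending_semicolon(line: str) -> bool:
--     """Single forward pass: track the open quote and an escape flag instead of
--     counting preceding backslashes backwards at every closing quote."""
--     quote = None
--     esc = False
--     for c in line:
--         if quote is not None:
--             if esc:
--                 esc = False
--             elif c == "\\":
--                 esc = True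
--             elif c == quote:
--                 quote = None
--         elif c in ('"', "'"):
--             quote = c
--         elif c == ";":
--             return True
--     return False
-- ===== Notes on version B (the rewrite author's own statement) =====
-- stated objective: faster
-- what changed: Replaced the backward backslash-counting at every closing quote with a single forward pass carrying a boolean escape flag (parity of the trailing backslash run).
import Mathlib
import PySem

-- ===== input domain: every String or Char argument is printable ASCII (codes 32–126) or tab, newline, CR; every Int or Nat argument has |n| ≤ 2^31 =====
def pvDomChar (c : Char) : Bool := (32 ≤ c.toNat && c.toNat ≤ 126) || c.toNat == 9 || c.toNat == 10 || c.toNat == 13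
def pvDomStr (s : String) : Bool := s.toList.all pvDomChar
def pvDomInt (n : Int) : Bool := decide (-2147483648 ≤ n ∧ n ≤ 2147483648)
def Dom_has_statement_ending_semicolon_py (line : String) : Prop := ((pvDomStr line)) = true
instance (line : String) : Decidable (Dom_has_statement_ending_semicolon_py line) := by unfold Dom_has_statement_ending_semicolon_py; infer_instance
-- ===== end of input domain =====

-- B replaces A's backward backslash-counting at each closing quote by a forward escape flag: one O(n) pass.

-- ===== PORT A =====
-- the inner `while j >= 0 and line[j] == "\\"` counting loop of A;
-- `pvBsCount cs i` = number of consecutive backslashes immediately before index i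
def pvBsCount (cs : List Char) : Nat → Nat
  | 0 => 0
  | j + 1 => if cs.getD j ' ' == '\\' then pvBsCount cs j + 1 else 0

-- the outer `while i < len(line)` loop of A, state = (in_string, i)
def pvLoopA (cs : List Char) (inStr : Option Char) (i : Nat) : Bool :=
  if _h : i < cs.length then
    let c := cs.getD i ' '
    match inStr with
    | some q =>
      if c == q then
        if pvBsCount cs i % 2 == 1 then
          pvLoopA cs (some q) (i + 1)       -- quote is escaped, stay in string
        else
          pvLoopA cs none (i + 1)
      else
        pvLoopA cs (some q) (i + 1)
    | none =>
      if c == '"' || c == '\'' then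
        pvLoopA cs (some c) (i + 1)
      else if c == ';' then
        true
      else
        pvLoopA cs none (i + 1)
  else
    false
termination_by cs.length - i

def has_statement_ending_semicolon_py (line : String) : Bool :=
  pvLoopA line.toList none 0

-- ===== PORT B =====
-- B's single forward pass: state = (open quote, escape flag)
def pvLoopB : List Char → Option Char → Bool → Bool
  | [], _, _ => false
  | c :: rest, some q, esc =>
      if esc then pvLoopB rest (some q) false
      else if c == '\\' then pvLoopB rest (some q) true
      else if c == q then pvLoopB rest none false
      else pvLoopB rest (some q) false
  | c :: rest, none, _ =>
      if c == '"' || c == '\'' then pvLoopB rest (some c) false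
      else if c == ';' then true
      else pvLoopB rest none false

def has_statement_ending_semicolon_py_alt (line : String) : Bool :=
  pvLoopB line.toList none false

-- ===== PRECONDITION & SPEC =====
def Spec_has_statement_ending_semicolon_py (line : String) (out : Bool) : Prop := out = has_statement_ending_semicolon_py_alt line
instance (line : String) (out : Bool) : Decidable (Spec_has_statement_ending_semicolon_py line out) := by unfold Spec_has_statement_ending_semicolon_py; infer_instance

-- ===== CLAIM (what is proved, stated in full; the proofs are below) =====
def Claim_equal_has_statement_ending_semicolon_py : Prop := ∀ (line : String), Dom_has_statement_ending_semicolon_py line → Spec_has_statement_ending_semicolon_py line (has_statement_ending_semicolon_py line)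

-- ===== LEMMAS AND PROOFS =====

-- Invariant: inside a string opened by quote q (which is never a backslash),
-- B's escape flag equals the parity of the backslash run ending just before i.
theorem pvLoop_eq : ∀ (n : Nat) (cs : List Char) (i : Nat) (inStr : Option Char) (esc : Bool),
    cs.length - i = n →
    (∀ q, inStr = some q → q ≠ '\\' ∧ esc = (pvBsCount cs i % 2 == 1)) →
    (inStr = none → esc = false) →
    pvLoopA cs inStr i = pvLoopB (cs.drop i) inStr esc := by
  intro n
  induction n with
  | zero =>
    intro cs i inStr esc hn _ _
    have hle : cs.length ≤ i := by omega
    rw [List.drop_eq_nil_of_le hle]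
    rw [pvLoopA]
    simp [Nat.not_lt.mpr hle, pvLoopB]
  | succ n ih =>
    intro cs i inStr esc hn hq hnone
    have hlt : i < cs.length := by omega
    have hdrop : cs.drop i = cs[i] :: cs.drop (i + 1) := List.drop_eq_getElem_cons hlt
    have hgetD : cs.getD i ' ' = cs[i] := List.getD_eq_getElem cs ' ' hlt
    have hbs : pvBsCount cs (i + 1) = if cs[i] == '\\' then pvBsCount cs i + 1 else 0 := by
      simp [pvBsCount, List.getD, List.getElem?_eq_getElem hlt]
    rw [pvLoopA]
    simp only [hlt, dif_pos, hgetD]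
    match inStr with
    | some q =>
      obtain ⟨hqbs, hesc⟩ := hq q rfl
      rw [hdrop]
      by_cases he : esc = true
      · -- escape flag set: parity odd, so even if c == q A stays in string
        simp only [pvLoopB, he, if_pos]
        by_cases hc : cs[i] = q
        · have : (cs[i] == q) = true := by simp [hc]
          rw [this]
          have hodd : (pvBsCount cs i % 2 == 1) = true := by rw [← hesc]; exact he
          rw [if_pos hodd]
          apply ih cs (i+1) (some q) false (by omega)
          · intro q' hq'; cases hq'
            refine ⟨hqbs, ?_⟩
            have : (cs[i] == '\\') = false := by
              simp only [beq_eq_false_iff_ne]; rw [hc]; exact hqbs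
            simp [hbs, this]
          · intro h; cases h
        · have : (cs[i] == q) = false := by simp [hc]
          rw [this]; simp only [Bool.false_eq_true, if_false]
          apply ih cs (i+1) (some q) false (by omega)
          · intro q' hq'; cases hq'
            refine ⟨hqbs, ?_⟩
            by_cases hb : cs[i] = '\\'
            · -- run grows by one: odd + 1 is even
              have hb' : (cs[i] == '\\') = true := by simp [hb]
              have hodd : pvBsCount cs i % 2 = 1 := by
                have := hesc.symm.trans he; simpa using this
              simp [hbs, hb', Nat.add_mod, hodd]
            · have hb' : (cs[i] == '\\') = false := by simp [hb]
              simp [hbs, hb']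
          · intro h; cases h
      · -- escape flag clear: parity even
        have he' : esc = false := by cases esc <;> simp_all
        have heven : (pvBsCount cs i % 2 == 1) = false := by rw [← hesc]; exact he'
        simp only [pvLoopB, he', Bool.false_eq_true, if_false]
        by_cases hb : cs[i] = '\\'
        · -- backslash: A skips (c ≠ q since q ≠ '\\'), B sets esc := true
          have hb' : (cs[i] == '\\') = true := by simp [hb]
          have hcq : (cs[i] == q) = false := by
            simp only [beq_eq_false_iff_ne]; rw [hb]; exact fun h => hqbs h.symm
          rw [hcq, hb']
          simp only [if_pos]
          apply ih cs (i+1) (some q) true (by omega)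
          · intro q' hq'; cases hq'
            refine ⟨hqbs, ?_⟩
            have heven' : pvBsCount cs i % 2 = 0 := by
              by_contra h
              have : pvBsCount cs i % 2 = 1 := by omega
              simp [this] at heven
            simp [hbs, hb', Nat.add_mod, heven']
          · intro h; cases h
        · have hb' : (cs[i] == '\\') = false := by simp [hb]
          rw [hb']
          by_cases hc : cs[i] = q
          · -- unescaped closing quote: both leave the string
            have : (cs[i] == q) = true := by simp [hc]
            rw [this]
            simp only [heven, Bool.false_eq_true, if_false]
            apply ih cs (i+1) none false (by omega)
            · intro q' hq'; cases hq'
            · intro _; rfl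
          · have : (cs[i] == q) = false := by simp [hc]
            rw [this]
            simp only [Bool.false_eq_true, if_false]
            apply ih cs (i+1) (some q) false (by omega)
            · intro q' hq'; cases hq'
              exact ⟨hqbs, by simp [hbs, hb']⟩
            · intro h; cases h
    | none =>
      rw [hdrop]
      by_cases hqo : (cs[i] == '"' || cs[i] == '\'') = true
      · simp only [pvLoopB, hqo, if_pos]
        apply ih cs (i+1) (some cs[i]) false (by omega)
        · intro q' hq'; cases hq'
          constructor
          · intro h
            rw [h] at hqo; simp at hqo
          · have : (cs[i] == '\\') = false := by
              rcases Bool.or_eq_true_iff.mp hqo with h | h <;>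
                (rw [eq_of_beq h]; decide)
            simp [hbs, this]
        · intro h; cases h
      · have hqo' : (cs[i] == '"' || cs[i] == '\'') = false := by
          cases h : (cs[i] == '"' || cs[i] == '\'') <;> simp_all
        simp only [pvLoopB, hqo', Bool.false_eq_true, if_false]
        by_cases hs : (cs[i] == ';') = true
        · simp only [hs, if_pos]
        · have hs' : (cs[i] == ';') = false := by cases h : (cs[i] == ';') <;> simp_all
          simp only [hs', Bool.false_eq_true, if_false]
          apply ih cs (i+1) none false (by omega)
          · intro q' hq'; cases hq'
          · intro _; rfl

-- ===== VERDICT (by name: the statement is the Claim_ definition above) =====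
theorem has_statement_ending_semicolon_py_spec : Claim_equal_has_statement_ending_semicolon_py := by
  intro line _
  unfold Spec_has_statement_ending_semicolon_py has_statement_ending_semicolon_py has_statement_ending_semicolon_py_alt
  have := pvLoop_eq line.toList.length line.toList 0 none false (by omega)
    (by intro q h; cases h) (fun _ => rfl)
  simpa using this
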